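-- pv_equiv track=rewrite | github.com/LenisS21/Compiladores | lenguaje.py | potenciaLenguaje
-- ===== SOURCE A (Python) =====
-- def potenciaLenguaje(lenguaje1, potencia):
--     if potencia == 0:
--         return {""}
--     else:
--         potencia_anterior = potenciaLenguaje(lenguaje1, potencia - 1)
--         potencia_actual = set()
--         for palabra in lenguaje1:
--             for palabra_anterior in potencia_anterior:
--                 potencia_actual.add(palabra + palabra_anterior)
--         return potencia_actual
-- ===== SOURCE B (Python) =====
-- def potenciaLenguaje(lenguaje1, potencia):
--     resultado = {""}
--     for _ in range(potencia):
--         resultado = {palabra + r for palabra in lenguaje1 for r in resultado}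
--     return resultado
-- ===== Notes on version B (the rewrite author's own statement) =====
-- stated objective: simpler
-- what changed: Replaces A's recursion on potencia by an iterative loop that folds one factor of the language into an accumulator set per step, using a set comprehension.
import Mathlib
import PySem

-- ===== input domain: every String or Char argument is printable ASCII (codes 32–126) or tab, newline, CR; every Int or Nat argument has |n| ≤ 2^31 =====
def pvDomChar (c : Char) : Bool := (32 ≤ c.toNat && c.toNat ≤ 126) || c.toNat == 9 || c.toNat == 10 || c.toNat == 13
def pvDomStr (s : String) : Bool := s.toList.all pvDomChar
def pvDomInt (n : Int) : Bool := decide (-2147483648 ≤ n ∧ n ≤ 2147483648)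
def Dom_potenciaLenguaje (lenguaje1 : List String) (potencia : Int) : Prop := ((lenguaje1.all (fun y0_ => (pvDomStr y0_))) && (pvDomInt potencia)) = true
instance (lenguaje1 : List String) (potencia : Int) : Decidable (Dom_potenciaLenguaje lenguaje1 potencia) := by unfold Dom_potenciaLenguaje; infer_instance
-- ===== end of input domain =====

-- B replaces A's recursion on potencia by an iterative accumulation (one factor of the language folded in per step): simpler, same cost; return values proved equal for potencia ≥ 0.


-- ===== PORT A =====
-- A recurses on potencia down to 0; with Pre_ (0 ≤ potencia) the recursion depth is potencia,
-- so the port recurses on potencia.toNat.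
def pLoopA (lenguaje1 : List String) : Nat → PySem.Set String
  | 0 => [""]
  | n + 1 =>
    let potencia_anterior := pLoopA lenguaje1 n
    lenguaje1.foldl
      (fun acc palabra =>
        potencia_anterior.foldl
          (fun acc2 palabra_anterior => PySem.Set.add acc2 (palabra ++ palabra_anterior)) acc)
      PySem.Set.empty

def potenciaLenguaje (lenguaje1 : List String) (potencia : Int) : List String :=
  pLoopA lenguaje1 potencia.toNat

-- ===== PORT B =====
-- resultado = {""}; for _ in range(potencia): resultado = {w + r for w in lenguaje1 for r in resultado}
def pStepB (lenguaje1 : List String) (resultado : List String) : PySem.Set String :=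
  PySem.Set.ofList (lenguaje1.flatMap (fun palabra => resultado.map (fun r => palabra ++ r)))

def pIterB (lenguaje1 : List String) : Nat → List String
  | 0 => [""]
  | n + 1 => pStepB lenguaje1 (pIterB lenguaje1 n)

def potenciaLenguaje_alt (lenguaje1 : List String) (potencia : Int) : List String :=
  pIterB lenguaje1 potencia.toNat

-- ===== PRECONDITION & SPEC =====
-- Pre_ excludes negative potencia: there A's recursion never reaches 0 and raises RecursionError
-- (B's range loop would return {""} there).
def Pre_potenciaLenguaje (_lenguaje1 : List String) (potencia : Int) : Prop := 0 ≤ potencia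
instance (lenguaje1 : List String) (potencia : Int) : Decidable (Pre_potenciaLenguaje lenguaje1 potencia) := by unfold Pre_potenciaLenguaje; infer_instance
def pvWitness_potenciaLenguaje : List String × Int := (["a", "bc"], 2)

def Spec_potenciaLenguaje (lenguaje1 : List String) (potencia : Int) (out : List String) : Prop := out = potenciaLenguaje_alt lenguaje1 potencia
instance (lenguaje1 : List String) (potencia : Int) (out : List String) : Decidable (Spec_potenciaLenguaje lenguaje1 potencia out) := by unfold Spec_potenciaLenguaje; infer_instance

-- ===== CLAIM (what is proved, stated in full; the proofs are below) =====
def Claim_equal_potenciaLenguaje : Prop := ∀ (lenguaje1 : List String) (potencia : Int), Dom_potenciaLenguaje lenguaje1 potencia → Pre_potenciaLenguaje lenguaje1 potencia → Spec_potenciaLenguaje lenguaje1 potencia (potenciaLenguaje lenguaje1 potencia)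

-- ===== LEMMAS AND PROOFS =====

-- folding Set.add over a flatMap is the nested fold A's two loops perform
theorem foldl_add_flatMap {α β : Type} [BEq α] (L : List β) (g : β → List α) (init : PySem.Set α) :
    (L.flatMap g).foldl PySem.Set.add init
      = L.foldl (fun acc w => (g w).foldl PySem.Set.add acc) init := by
  induction L generalizing init with
  | nil => rfl
  | cons w ws ih => simp [List.flatMap_cons, List.foldl_append, ih]

theorem pLoop_eq (lenguaje1 : List String) (n : Nat) :
    pLoopA lenguaje1 n = pIterB lenguaje1 n := by
  induction n with
  | zero => rfl
  | succ n ih =>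
    show _ = pStepB lenguaje1 (pIterB lenguaje1 n)
    rw [pStepB, PySem.Set.ofList_eq_foldl, foldl_add_flatMap]
    simp [pLoopA, ih, List.foldl_map]

-- ===== VERDICT (by name: the statement is the Claim_ definition above) =====
theorem potenciaLenguaje_spec : Claim_equal_potenciaLenguaje := by
  intro L p _ _
  show potenciaLenguaje L p = potenciaLenguaje_alt L p
  unfold potenciaLenguaje potenciaLenguaje_alt
  exact pLoop_eq L p.toNat
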